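-- pv_equiv track=rewrite | github.com/szwyx1999/Simple-CN-JP-Translation | sports_data_filtering/wccjc_sports_filter_v2.py | detect_tsv_delimiter
-- ===== SOURCE A (Python) =====
-- from typing import Dict, Iterable, List, Optional, Tuple
--
-- def detect_tsv_delimiter(sample_lines: List[str]) -> Optional[str]:
--     """
--     Detect a delimiter for a TSV-like parallel file.
--     We check a few common patterns.
--     """
--     # Ignore empty lines for detection
--     lines = [ln for ln in sample_lines if ln.strip()]
--     if not lines:
--         return None
--
--     # Count occurrences
--     if any("\t" in ln for ln in lines):
--         return "\t"
--
--     if any("|||" in ln for ln in lines):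
--         return "|||"
--
--     if any("@@@" in ln for ln in lines):
--         return "@@@"
--
--     return None
-- ===== SOURCE B (Python) =====
-- def detect_tsv_delimiter(sample_lines):
--     """One pass: record which delimiters appear in non-blank lines, then
--     return by priority \t > ||| > @@@, else None."""
--     saw_tab = saw_pipe = saw_at = False
--     for ln in sample_lines:
--         if ln.strip():
--             saw_tab = saw_tab or "\t" in ln
--             saw_pipe = saw_pipe or "|||" in ln
--             saw_at = saw_at or "@@@" in ln
--     if saw_tab:
--         return "\t"
--     if saw_pipe:
--         return "|||"
--     if saw_at:
--         return "@@@"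
--     return None
-- ===== Notes on version B (the rewrite author's own statement) =====
-- stated objective: simpler
-- what changed: Replaces A's filter-then-three-any-scans (up to four passes over the lines, building an intermediate filtered list) with a single pass accumulating three seen-flags and a priority fall-through; the empty-input guard disappears since no flags set already yields None.
import Mathlib
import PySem

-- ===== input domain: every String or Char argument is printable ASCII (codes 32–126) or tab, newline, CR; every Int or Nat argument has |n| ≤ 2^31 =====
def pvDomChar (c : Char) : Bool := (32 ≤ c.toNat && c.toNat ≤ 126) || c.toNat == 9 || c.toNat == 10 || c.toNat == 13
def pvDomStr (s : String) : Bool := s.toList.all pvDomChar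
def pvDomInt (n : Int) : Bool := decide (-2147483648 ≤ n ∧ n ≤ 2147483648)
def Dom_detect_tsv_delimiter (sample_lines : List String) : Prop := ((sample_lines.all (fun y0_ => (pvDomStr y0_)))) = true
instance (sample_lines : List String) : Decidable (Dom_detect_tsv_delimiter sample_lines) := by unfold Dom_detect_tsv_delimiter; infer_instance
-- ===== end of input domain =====

-- B folds the lines once into three seen-flags and falls through by priority; simpler than A's filter + three any-scans.

-- ===== PORT A =====
def detect_tsv_delimiter (sample_lines : List String) : Option String :=
  let lines := sample_lines.filter (fun ln => !(PySem.Str.strip ln == ""))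
  if lines = [] then none
  else if lines.any (fun ln => PySem.Str.isIn "\t" ln) then some "\t"
  else if lines.any (fun ln => PySem.Str.isIn "|||" ln) then some "|||"
  else if lines.any (fun ln => PySem.Str.isIn "@@@" ln) then some "@@@"
  else none

-- ===== PORT B =====
def detect_tsv_delimiter_alt (sample_lines : List String) : Option String :=
  let flags := sample_lines.foldl
    (fun (st : Bool × Bool × Bool) ln =>
      if !(PySem.Str.strip ln == "") then
        (st.1 || PySem.Str.isIn "\t" ln,
         st.2.1 || PySem.Str.isIn "|||" ln,
         st.2.2 || PySem.Str.isIn "@@@" ln)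
      else st)
    (false, false, false)
  if flags.1 then some "\t"
  else if flags.2.1 then some "|||"
  else if flags.2.2 then some "@@@"
  else none

-- ===== PRECONDITION & SPEC =====
def Spec_detect_tsv_delimiter (sample_lines : List String) (out : Option String) : Prop := out = detect_tsv_delimiter_alt sample_lines
instance (sample_lines : List String) (out : Option String) : Decidable (Spec_detect_tsv_delimiter sample_lines out) := by unfold Spec_detect_tsv_delimiter; infer_instance

-- ===== CLAIM (what is proved, stated in full; the proofs are below) =====
def Claim_equal_detect_tsv_delimiter : Prop := ∀ (sample_lines : List String), Dom_detect_tsv_delimiter sample_lines → Spec_detect_tsv_delimiter sample_lines (detect_tsv_delimiter sample_lines)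

-- ===== LEMMAS AND PROOFS =====

-- B's fold computes exactly the three any-scans of A over the filtered list.
theorem pv_fold_flags (sample_lines : List String) (t p a : Bool) :
    sample_lines.foldl
      (fun (st : Bool × Bool × Bool) ln =>
        if !(PySem.Str.strip ln == "") then
          (st.1 || PySem.Str.isIn "\t" ln,
           st.2.1 || PySem.Str.isIn "|||" ln,
           st.2.2 || PySem.Str.isIn "@@@" ln)
        else st)
      (t, p, a)
    = (let lines := sample_lines.filter (fun ln => !(PySem.Str.strip ln == ""))
       (t || lines.any (fun ln => PySem.Str.isIn "\t" ln),
        p || lines.any (fun ln => PySem.Str.isIn "|||" ln),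
        a || lines.any (fun ln => PySem.Str.isIn "@@@" ln))) := by
  induction sample_lines generalizing t p a with
  | nil => simp
  | cons hd tl ih =>
    by_cases h : (!(PySem.Str.strip hd == "")) = true
    · rw [List.foldl_cons, if_pos h, ih]
      simp [h, Bool.or_assoc]
    · rw [List.foldl_cons, if_neg h, ih]
      simp at h
      simp [h]

-- ===== VERDICT (by name: the statement is the Claim_ definition above) =====
theorem detect_tsv_delimiter_spec : Claim_equal_detect_tsv_delimiter := by
  intro sample_lines _
  unfold Spec_detect_tsv_delimiter detect_tsv_delimiter detect_tsv_delimiter_alt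
  rw [pv_fold_flags]
  simp only [Bool.false_or]
  by_cases hnil : sample_lines.filter (fun ln => !(PySem.Str.strip ln == "")) = []
  · simp [hnil]
  · simp [hnil]
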